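-- pv_equiv track=rewrite | github.com/palika-hub/OS-Algorithms | algorithms/cpu_scheduling.py | shortest_job_first
-- ===== SOURCE A (Python) =====
-- def change_time_to_process(process_at_t):
--     processes_time = []
--     start = 0
--     total = 1
--     for i in range(1,len(process_at_t)):
--         if process_at_t[i] == process_at_t[i-1] :
--             total+=1
--         else :
--             processes_time.append([process_at_t[i-1] , start , start+total])
--             start = i
--             total =1
--     processes_time.append([process_at_t[-1] , start , start+total])
--
--     return processes_time
--
-- def shortest_job_first(arrival_time_array , burst_time_array):
--
--     joint_arr =[]
--     total_processes = len(arrival_time_array)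
--     remaining_time = burst_time_array.copy()
--
--     process_at_each_time = []
--     time = 0
--     waiting_time = [0]*total_processes
--     turnaround_time = [0]*total_processes
--     curr = -1
--     while True:
--
--         idx = -1
--         t1 = 1e9
--         for i in range(total_processes):
--             if (arrival_time_array[i] <= time ) :
--                 if (remaining_time[i] > 0 and remaining_time[i] < t1) :
--                     idx = i
--                     t1 = remaining_time[i]
--         if (idx == -1) :
--             if max(remaining_time) == 0:
--                 break
--             else:
--                 process_at_each_time.append(-1)
--         else :
--             if (curr != -1 and remaining_time[idx] == remaining_time[curr] ):
--                 idx = curr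
--             process_at_each_time.append(idx)
--             remaining_time[idx]-=1
--
--             if (remaining_time[idx] == 0) :
--                 waiting_time[idx] = 1+time-arrival_time_array[idx]-burst_time_array[idx]
--                 turnaround_time = 1+time - arrival_time_array[idx]
--             curr = idx
--         time+=1
--     average_Waiting_time = sum(waiting_time)/total_processes
--
--     processes_time = change_time_to_process(process_at_each_time)
--     return processes_time
-- ===== SOURCE B (Python) =====
-- def _emit(out, pid, s, e):
--     if out and out[-1][0] == pid:
--         out[-1][2] = e
--     else:
--         out.append([pid, s, e])
--
-- def shortest_job_first(arrival_time_array, burst_time_array):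
--     # Event-driven SRTF: jump from decision point to decision point
--     # (completions and arrivals) instead of simulating every time tick.
--     n = len(arrival_time_array)
--     rem = list(burst_time_array[:n])
--     out = []
--     time = 0
--     curr = -1
--     while True:
--         eligible = [(rem[i], i) for i in range(n)
--                     if arrival_time_array[i] <= time and rem[i] > 0]
--         future = [arrival_time_array[i] for i in range(n)
--                   if arrival_time_array[i] > time and rem[i] > 0]
--         if not eligible:
--             if not future:
--                 break
--             nxt = min(future)
--             _emit(out, -1, time, nxt)
--             time = nxt
--             continue
--         r, j = min(eligible)
--         if curr != -1 and rem[curr] == r: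
--             j = curr
--         stop = time + rem[j]
--         if future:
--             stop = min(stop, min(future))
--         rem[j] -= stop - time
--         _emit(out, j, time, stop)
--         curr = j
--         time = stop
--     return out
-- ===== Notes on version B (the rewrite author's own statement) =====
-- stated objective: faster
-- what changed: A simulates SRTF one time-tick at a time (a full scan of all processes per tick, then a run-length compression pass over the per-tick trace); B is an event-driven simulation that jumps directly from decision point to decision point (arrivals and completions), runs the chosen process for the whole chunk, and emits the merged run intervals on the fly.
-- outside the precondition, e.g. on shortest_job_first([-1, 2], [1]): A returns [[0, 0, 1]], B raises IndexError
import Mathlib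
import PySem

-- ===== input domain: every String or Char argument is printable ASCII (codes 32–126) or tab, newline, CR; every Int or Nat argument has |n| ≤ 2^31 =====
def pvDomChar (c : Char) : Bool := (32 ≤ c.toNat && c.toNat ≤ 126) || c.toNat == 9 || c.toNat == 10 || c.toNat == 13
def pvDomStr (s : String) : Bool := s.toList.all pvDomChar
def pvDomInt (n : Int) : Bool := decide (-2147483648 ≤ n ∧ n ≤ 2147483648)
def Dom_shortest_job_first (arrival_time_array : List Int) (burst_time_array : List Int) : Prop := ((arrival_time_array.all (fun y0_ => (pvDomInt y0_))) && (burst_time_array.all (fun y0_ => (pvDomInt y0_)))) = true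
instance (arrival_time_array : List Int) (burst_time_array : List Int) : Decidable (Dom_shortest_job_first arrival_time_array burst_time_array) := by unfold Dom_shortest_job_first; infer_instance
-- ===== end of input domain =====

-- B replaces A's one-tick-at-a-time SRTF simulation (one pass over all processes per
-- time unit) by an event-driven simulation that jumps from decision point to decision
-- point (arrivals and completions) and emits the run intervals directly: faster.


-- fuel bound for both while-True loops (a totality guard only; proved sufficient below)
def sjfFuel (arrival burst : List Int) : Nat :=
  ((arrival.foldl (fun m a => max m a) 0) + (burst.foldl (fun s b => s + max b 0) 0)).toNat + 2

-- ===== PORT A =====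
def change_time_to_process (process_at_t : List Int) : List (List Int) :=
  let s := (PySem.List.pyRange 1 (process_at_t.length : Int) 1).foldl
    (fun (st : List (List Int) × Int × Int) i =>
      if PySem.List.pyGetD process_at_t i 0 = PySem.List.pyGetD process_at_t (i-1) 0 then
        (st.1, st.2.1, st.2.2 + 1)
      else
        (st.1 ++ [[PySem.List.pyGetD process_at_t (i-1) 0, st.2.1, st.2.1 + st.2.2]], i, 1))
    ([], 0, 1)
  -- process_at_t[-1]: IndexError on an empty trace — excluded by Pre_
  s.1 ++ [[PySem.List.pyGetD process_at_t (-1) 0, s.2.1, s.2.1 + s.2.2]]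

-- the inner 'for i in range(total_processes)' selection scan (t1 starts at 1e9)
def sjfScan (arrival rem : List Int) (total time : Int) : Int × Int :=
  (PySem.List.pyRange 0 total 1).foldl
    (fun (p : Int × Int) i =>
      if PySem.List.pyGetD arrival i 0 ≤ time then
        (if 0 < PySem.List.pyGetD rem i 0 ∧ PySem.List.pyGetD rem i 0 < p.2
         then (i, PySem.List.pyGetD rem i 0) else p)
      else p)
    (-1, 1000000000)

-- the 'while True' loop; waiting_time is threaded exactly as in A (it never affects the
-- returned value); turnaround_time (dead store, overwritten by an int) and
-- average_Waiting_time (a dead float) are omitted.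
def sjfLoop (arrival burst : List Int) (total : Int) :
    Nat → List Int → List Int → List Int → Int → Int → List Int
  | 0, _rem, pt, _wt, _time, _curr => pt
  | f+1, rem, pt, wt, time, curr =>
    let idx0 := (sjfScan arrival rem total time).1
    if idx0 = -1 then
      if PySem.List.max? rem (fun x => x) = some 0 then pt
      else sjfLoop arrival burst total f rem (pt ++ [-1]) wt (time+1) curr
    else
      let idx := if curr ≠ -1 ∧ PySem.List.pyGetD rem idx0 0 = PySem.List.pyGetD rem curr 0 then curr else idx0
      let rem' := PySem.List.pySetD rem idx (PySem.List.pyGetD rem idx 0 - 1)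
      let wt' := if PySem.List.pyGetD rem' idx 0 = 0
        then PySem.List.pySetD wt idx (1 + time - PySem.List.pyGetD arrival idx 0 - PySem.List.pyGetD burst idx 0)
        else wt
      sjfLoop arrival burst total f rem' (pt ++ [idx]) wt' (time+1) idx

def shortest_job_first (arrival_time_array : List Int) (burst_time_array : List Int) : List (List Int) :=
  change_time_to_process
    (sjfLoop arrival_time_array burst_time_array (arrival_time_array.length : Int)
      (sjfFuel arrival_time_array burst_time_array)
      burst_time_array [] (List.replicate arrival_time_array.length 0) 0 (-1))

-- ===== PORT B =====
def sjfEmit (out : List (List Int)) (pid s e : Int) : List (List Int) :=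
  match out.getLast? with
  | some l => if PySem.List.pyGetD l 0 0 = pid
      then out.dropLast ++ [PySem.List.pySetD l 2 e]
      else out ++ [[pid, s, e]]
  | none => [[pid, s, e]]

def sjfElig (arrival rem : List Int) (n time : Int) : List (Int × Int) :=
  ((PySem.List.pyRange 0 n 1).filter
    (fun i => decide (PySem.List.pyGetD arrival i 0 ≤ time) && decide (0 < PySem.List.pyGetD rem i 0))).map
    (fun i => (PySem.List.pyGetD rem i 0, i))

def sjfFuture (arrival rem : List Int) (n time : Int) : List Int :=
  ((PySem.List.pyRange 0 n 1).filter
    (fun i => decide (time < PySem.List.pyGetD arrival i 0) && decide (0 < PySem.List.pyGetD rem i 0))).map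
    (fun i => PySem.List.pyGetD arrival i 0)

def sjfAltLoop (arrival : List Int) (n : Int) :
    Nat → List Int → List (List Int) → Int → Int → List (List Int)
  | 0, _rem, out, _time, _curr => out
  | f+1, rem, out, time, curr =>
    let eligible := sjfElig arrival rem n time
    let future := sjfFuture arrival rem n time
    if eligible.isEmpty then
      match PySem.List.min? future (fun x => x) with
      | none => out
      | some nxt => sjfAltLoop arrival n f rem (sjfEmit out (-1) time nxt) nxt curr
    else
      match PySem.List.min2? eligible (fun p => p.1) (fun p => p.2) with
      | none => out   -- unreachable: eligible ≠ []
      | some m =>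
        let j := if curr ≠ -1 ∧ PySem.List.pyGetD rem curr 0 = m.1 then curr else m.2
        let stop0 := time + PySem.List.pyGetD rem j 0
        let stop := match PySem.List.min? future (fun x => x) with
          | none => stop0
          | some mf => min stop0 mf
        sjfAltLoop arrival n f
          (PySem.List.pySetD rem j (PySem.List.pyGetD rem j 0 - (stop - time)))
          (sjfEmit out j time stop) stop j

def shortest_job_first_alt (arrival_time_array : List Int) (burst_time_array : List Int) : List (List Int) :=
  sjfAltLoop arrival_time_array (arrival_time_array.length : Int)
    (sjfFuel arrival_time_array burst_time_array)
    (PySem.List.slice burst_time_array none (some (arrival_time_array.length : Int)))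
    [] 0 (-1)

-- ===== PRECONDITION & SPEC =====
-- Pre_ excludes the inputs on which A raises or never returns: a burst list shorter than
-- the arrival list (IndexError — except in the accidental corner where every missing
-- process's arrival lies beyond the end of the schedule, so A never reads the missing
-- bursts and returns; B, which sizes its state up front, raises there),
-- no positive burst among the first n (empty schedule →
-- IndexError in change_time_to_process, or an endless idle loop), a burst ≥ 10^9 among
-- the first n (never selectable past the float 1e9 sentinel → endless loop), or a
-- positive extra burst beyond the arrivals (max(remaining) never reaches 0 → endless loop).
def Pre_shortest_job_first (arrival_time_array : List Int) (burst_time_array : List Int) : Prop :=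
  arrival_time_array.length ≤ burst_time_array.length ∧
  (∃ i < arrival_time_array.length, 0 < burst_time_array.getD i 0) ∧
  (∀ i < arrival_time_array.length, burst_time_array.getD i 0 < 1000000000) ∧
  (∀ b ∈ burst_time_array.drop arrival_time_array.length, b ≤ 0)
instance (arrival_time_array : List Int) (burst_time_array : List Int) : Decidable (Pre_shortest_job_first arrival_time_array burst_time_array) := by unfold Pre_shortest_job_first; infer_instance

def pvWitness_shortest_job_first : List Int × List Int := ([0, 2], [3, 1])

def Spec_shortest_job_first (arrival_time_array : List Int) (burst_time_array : List Int) (out : List (List Int)) : Prop := out = shortest_job_first_alt arrival_time_array burst_time_array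
instance (arrival_time_array : List Int) (burst_time_array : List Int) (out : List (List Int)) : Decidable (Spec_shortest_job_first arrival_time_array burst_time_array out) := by unfold Spec_shortest_job_first; infer_instance

-- ===== CLAIM (what is proved, stated in full; the proofs are below) =====
def Claim_equal_shortest_job_first : Prop := ∀ (arrival_time_array : List Int) (burst_time_array : List Int), Dom_shortest_job_first arrival_time_array burst_time_array → Pre_shortest_job_first arrival_time_array burst_time_array → Spec_shortest_job_first arrival_time_array burst_time_array (shortest_job_first arrival_time_array burst_time_array)
-- ===== LEMMAS AND PROOFS =====

-- ---- interval representation of a per-tick trace ----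
def grp (v s e : Int) : List Int → List (List Int)
  | [] => [[v, s, e]]
  | y :: ys => if y = v then grp v s (e+1) ys else [v, s, e] :: grp y e (e+1) ys

def rep : List Int → List (List Int)
  | [] => []
  | x :: xs => grp x 0 1 xs


theorem pyGetD_pySetD02 (l : List Int) (e : Int) :
    PySem.List.pyGetD (PySem.List.pySetD l 2 e) 0 0 = PySem.List.pyGetD l 0 0 := by
  rw [PySem.List.pySetD_of_nonneg _ _ (by norm_num)]
  rw [PySem.List.pyGetD_zero, PySem.List.pyGetD_zero]
  cases l <;> simp

theorem pySetD_pySetD2 (l : List Int) (e e' : Int) :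
    PySem.List.pySetD (PySem.List.pySetD l 2 e) 2 e' = PySem.List.pySetD l 2 e' := by
  rw [PySem.List.pySetD_of_nonneg _ _ (by norm_num), PySem.List.pySetD_of_nonneg _ _ (by norm_num),
      PySem.List.pySetD_of_nonneg _ _ (by norm_num), List.set_set]

theorem grp_ne_nil (v s e : Int) (ys : List Int) : grp v s e ys ≠ [] := by
  induction ys generalizing v s e with
  | nil => simp [grp]
  | cons y ys ih => by_cases h : y = v <;> simp [grp, h, ih]

theorem emit_cons (l : List Int) (L : List (List Int)) (pid s e : Int) (h : L ≠ []) :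
    sjfEmit (l :: L) pid s e = l :: sjfEmit L pid s e := by
  rcases List.eq_nil_or_concat L with rfl | ⟨L', x, rfl⟩
  · exact absurd rfl h
  · simp only [List.concat_eq_append] at *
    show sjfEmit ((l :: L') ++ [x]) pid s e = l :: sjfEmit (L' ++ [x]) pid s e
    simp only [sjfEmit, List.getLast?_concat, List.dropLast_concat]
    split_ifs <;> simp

theorem emit_last_same (out : List (List Int)) (j s e s' e' : Int) :
    sjfEmit (out ++ [[j, s, e]]) j s' e' = out ++ [[j, s, e']] := by
  simp only [sjfEmit, List.getLast?_concat]
  have h0 : PySem.List.pyGetD ([j, s, e] : List Int) 0 0 = j := by simp [PySem.List.pyGetD_zero]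
  have hst : PySem.List.pySetD ([j, s, e] : List Int) 2 e' = [j, s, e'] := by
    rw [PySem.List.pySetD_of_nonneg _ _ (by norm_num)]; rfl
  rw [if_pos h0, List.dropLast_concat, hst]

theorem emit_emit (out : List (List Int)) (j s e s' e' : Int) :
    sjfEmit (sjfEmit out j s e) j s' e' = sjfEmit out j s e' := by
  rcases List.eq_nil_or_concat out with rfl | ⟨out', l, rfl⟩
  · have h1 : sjfEmit ([] : List (List Int)) j s e = [] ++ [[j, s, e]] := by simp [sjfEmit]
    have h2 : sjfEmit ([] : List (List Int)) j s e' = [] ++ [[j, s, e']] := by simp [sjfEmit]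
    rw [h1, emit_last_same, h2]
  · simp only [List.concat_eq_append]
    by_cases hl : PySem.List.pyGetD l 0 0 = j
    · simp only [sjfEmit, List.getLast?_concat, hl, if_pos, List.dropLast_concat, pySetD_pySetD2]
      rw [if_pos (by rw [pyGetD_pySetD02]; exact hl)]
    · have e1 : sjfEmit (out' ++ [l]) j s e = (out' ++ [l]) ++ [[j, s, e]] := by
        simp only [sjfEmit, List.getLast?_concat, hl, ite_false]
      have e2 : sjfEmit (out' ++ [l]) j s e' = (out' ++ [l]) ++ [[j, s, e']] := by
        simp only [sjfEmit, List.getLast?_concat, hl, ite_false]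
      rw [e1, emit_last_same, e2]

theorem grp_append (ys : List Int) (v s e j : Int) :
    grp v s e (ys ++ [j]) = sjfEmit (grp v s e ys) j (e + ys.length) (e + ys.length + 1) := by
  induction ys generalizing v s e with
  | nil =>
    simp only [List.nil_append, grp, List.length_nil, Int.natCast_zero, add_zero]
    have h0 : PySem.List.pyGetD ([v, s, e] : List Int) 0 0 = v := by simp [PySem.List.pyGetD_zero]
    by_cases h : j = v
    · rw [if_pos h]
      simp only [grp, sjfEmit, List.getLast?_singleton]
      rw [if_pos (by rw [h0, h])]
      have hset : PySem.List.pySetD ([v, s, e] : List Int) 2 (e + 1) = [v, s, e + 1] := by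
        rw [PySem.List.pySetD_of_nonneg _ _ (by norm_num)]; rfl
      simp [hset, h]
    · rw [if_neg h]
      simp only [grp, sjfEmit, List.getLast?_singleton]
      rw [if_neg (by rw [h0]; exact fun hh => h hh.symm)]
      simp [grp]
  | cons y ys ih =>
    by_cases h : y = v
    · simp only [List.cons_append, grp, if_pos h]
      rw [ih]
      congr 1 <;> push_cast [List.length_cons] <;> ring
    · simp only [List.cons_append, grp, if_neg h]
      rw [ih, ← emit_cons _ _ _ _ _ (grp_ne_nil _ _ _ _)]
      congr 1 <;> push_cast [List.length_cons] <;> ring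

theorem rep_append1 (pt : List Int) (j : Int) :
    rep (pt ++ [j]) = sjfEmit (rep pt) j pt.length (pt.length + 1) := by
  cases pt with
  | nil => simp [rep, grp, sjfEmit]
  | cons x xs =>
    show rep (x :: (xs ++ [j])) = _
    simp only [rep, grp_append]
    congr 1 <;> push_cast [List.length_cons] <;> ring

theorem rep_chunk (pt : List Int) (j : Int) (d : Nat) (hd : 1 ≤ d) :
    rep (pt ++ List.replicate d j) = sjfEmit (rep pt) j pt.length (pt.length + d) := by
  induction d with
  | zero => omega
  | succ d ih =>
    rcases Nat.eq_zero_or_pos d with rfl | hd'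
    · simpa using rep_append1 pt j
    · rw [List.replicate_succ', ← List.append_assoc, rep_append1, ih hd', emit_emit]
      congr 1 <;> push_cast [List.length_append, List.length_replicate] <;> ring

theorem ctp_aux (ys : List Int) : ∀ (pt : List Int) (i : Nat) (acc : List (List Int)) (v s t : Int),
    pt.drop i = ys → 1 ≤ i → i ≤ pt.length → t = (i : Int) - s →
    PySem.List.pyGetD pt ((i : Int) - 1) 0 = v →
    (let r := (PySem.List.pyRange (i : Int) (pt.length : Int) 1).foldl
      (fun (st : List (List Int) × Int × Int) k =>
        if PySem.List.pyGetD pt k 0 = PySem.List.pyGetD pt (k-1) 0 then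
          (st.1, st.2.1, st.2.2 + 1)
        else
          (st.1 ++ [[PySem.List.pyGetD pt (k-1) 0, st.2.1, st.2.1 + st.2.2]], k, 1))
      (acc, s, t);
     r.1 ++ [[PySem.List.pyGetD pt (-1) 0, r.2.1, r.2.1 + r.2.2]]) = acc ++ grp v s (i : Int) ys := by
  induction ys with
  | nil =>
    intro pt i acc v s t hdrop h1 h2 ht hv
    have hlen : i = pt.length := by
      have := congrArg List.length hdrop
      simp [List.length_drop] at this
      omega
    subst hlen
    rw [PySem.List.pyRange_one_eq_nil (by omega)]
    simp only [List.foldl_nil, grp]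
    have hne : pt ≠ [] := by intro hh; subst hh; simp at h1
    have hlast : PySem.List.pyGetD pt (-1) 0 = v := by
      rw [PySem.List.pyGetD_neg_one pt 0 hne, ← hv,
        PySem.List.pyGetD_eq_getElem pt 0 (by omega) (by push_cast; omega)]
      rw [List.getLast_eq_getElem]
      congr 1
      omega
    rw [hlast, ht]
    have : s + ((pt.length : Int) - s) = (pt.length : Int) := by ring
    rw [this]
  | cons y ys ihy =>
    intro pt i acc v s t hdrop h1 h2 ht hv
    have hilt : i < pt.length := by
      have := congrArg List.length hdrop
      simp [List.length_drop] at this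
      omega
    have hyi : PySem.List.pyGetD pt (i : Int) 0 = y := by
      have hq : pt[i]? = some y := by
        have h' := congrArg (fun l => l[0]?) hdrop
        simp only at h'
        rwa [List.getElem?_drop, Nat.add_zero] at h'
      have h2' := List.getElem?_eq_getElem (show i < pt.length by omega)
      rw [hq] at h2'
      rw [PySem.List.pyGetD_eq_getElem pt 0 (by omega) (by push_cast; omega)]
      simp only [Int.toNat_natCast]
      exact (Option.some.inj h2').symm
    have hdrop' : pt.drop (i+1) = ys := by
      have h3 : pt.drop (i+1) = (pt.drop i).drop 1 := by rw [List.drop_drop]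
      rw [h3, hdrop]
      rfl
    have hcast : ((i:Int)) + 1 = (((i+1:Nat)):Int) := by push_cast; ring
    rw [PySem.List.pyRange_one_cons (by push_cast; omega)]
    simp only [List.foldl_cons, grp]
    by_cases hcase : y = v
    · rw [if_pos (by rw [hyi, hv, hcase]), if_pos hcase]
      have hstep := ihy pt (i+1) acc v s (t+1) hdrop' (by omega) (by omega)
        (by push_cast; omega)
        (by rw [show (((i+1:Nat)):Int) - 1 = (i:Int) from by push_cast; ring, hyi, hcase])
      simp only at hstep ⊢
      rw [hcast, hstep]
    · rw [if_neg (by rw [hyi, hv]; exact hcase), if_neg hcase, hv,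
        show s + t = (i:Int) from by rw [ht]; ring]
      have hstep := ihy pt (i+1) (acc ++ [[v, s, (i:Int)]]) y (i:Int) 1 hdrop' (by omega) (by omega)
        (by push_cast; ring)
        (by rw [show (((i+1:Nat)):Int) - 1 = (i:Int) from by push_cast; ring, hyi])
      simp only at hstep ⊢
      rw [hcast, hstep, List.append_assoc]
      rfl

theorem ctp_rep (pt : List Int) (h : pt ≠ []) : change_time_to_process pt = rep pt := by
  cases pt with
  | nil => exact absurd rfl h
  | cons x xs =>
    have := ctp_aux xs (x :: xs) 1 [] x 0 1 (by simp) (by omega) (by simp) (by norm_num)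
      (by simpa [PySem.List.pyGetD_zero] using rfl)
    simp only at this
    unfold change_time_to_process
    simpa [rep] using this

-- ---- the selection scan ----
def minStep (p : Int × Int) (e : Int × Int) : Int × Int := if e.1 < p.2 then (e.2, e.1) else p

-- A's selected process (scan + keep-current tie rule), -1 if none
def selA (arrival rem : List Int) (n time curr : Int) : Int :=
  let idx0 := (sjfScan arrival rem n time).1
  if idx0 = -1 then -1
  else if curr ≠ -1 ∧ PySem.List.pyGetD rem idx0 0 = PySem.List.pyGetD rem curr 0 then curr else idx0

theorem scanfold_gen (arrival rem : List Int) (time : Int) (L : List Int) (p : Int × Int) :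
    L.foldl
      (fun (p : Int × Int) i =>
        if PySem.List.pyGetD arrival i 0 ≤ time then
          (if 0 < PySem.List.pyGetD rem i 0 ∧ PySem.List.pyGetD rem i 0 < p.2
           then (i, PySem.List.pyGetD rem i 0) else p)
        else p) p
    = ((L.filter (fun i => decide (PySem.List.pyGetD arrival i 0 ≤ time) && decide (0 < PySem.List.pyGetD rem i 0))).map
        (fun i => (PySem.List.pyGetD rem i 0, i))).foldl minStep p := by
  induction L generalizing p with
  | nil => rfl
  | cons i L ih =>
    simp only [List.foldl_cons, List.filter_cons]
    by_cases h1 : PySem.List.pyGetD arrival i 0 ≤ time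
    · by_cases h2 : 0 < PySem.List.pyGetD rem i 0
      · by_cases h3 : PySem.List.pyGetD rem i 0 < p.2 <;>
          simp [h1, h2, h3, minStep, ih]
      · simp [h1, h2, ih]
    · simp [h1, ih]

theorem scan_eq_fold (arrival rem : List Int) (n time : Int) :
    sjfScan arrival rem n time = (sjfElig arrival rem n time).foldl minStep (-1, 1000000000) := by
  unfold sjfScan sjfElig
  exact scanfold_gen arrival rem time _ _

def min2b (acc : Option (Int × Int)) (x : Int × Int) : Option (Int × Int) :=
  match acc with
  | none => some x
  | some m => if (decide (x.1 < m.1) || (!decide (m.1 < x.1) && decide (x.2 < m.2))) = true then some x else some m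

def step2 (m x : Int × Int) : Int × Int :=
  if (decide (x.1 < m.1) || (!decide (m.1 < x.1) && decide (x.2 < m.2))) = true then x else m

theorem min2_eq (es : List (Int × Int)) :
    PySem.List.min2? es (fun p => p.1) (fun p => p.2) = es.foldl min2b none := by
  unfold PySem.List.min2?
  apply List.foldl_ext
  intro acc x hx
  cases acc <;> rfl

theorem min2_some (es : List (Int × Int)) (m : Int × Int) :
    es.foldl min2b (some m) = some (es.foldl step2 m) := by
  induction es generalizing m with
  | nil => rfl
  | cons e es ih =>
    simp only [List.foldl_cons, min2b, step2]
    split_ifs <;> rw [ih]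

theorem step2_mem (es : List (Int × Int)) (m : Int × Int) :
    es.foldl step2 m = m ∨ es.foldl step2 m ∈ es := by
  induction es generalizing m with
  | nil => exact Or.inl rfl
  | cons e es ih =>
    simp only [List.foldl_cons]
    rcases ih (step2 m e) with h | h
    · rw [h]
      unfold step2
      split_ifs
      · exact Or.inr (List.mem_cons_self)
      · exact Or.inl rfl
    · exact Or.inr (List.mem_cons_of_mem _ h)

theorem min2_ne_nil (es : List (Int × Int)) (h : es ≠ []) :
    ∃ m, PySem.List.min2? es (fun p => p.1) (fun p => p.2) = some m := by
  cases es with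
  | nil => exact absurd rfl h
  | cons e es => exact ⟨es.foldl step2 e, by rw [min2_eq]; simpa [min2b] using min2_some es e⟩

theorem min2_mem (es : List (Int × Int)) (m : Int × Int)
    (h : PySem.List.min2? es (fun p => p.1) (fun p => p.2) = some m) : m ∈ es := by
  cases es with
  | nil => simp [min2_eq, min2b] at h
  | cons e es =>
    rw [min2_eq] at h
    simp only [List.foldl_cons, min2b] at h
    rw [min2_some] at h
    rcases step2_mem es e with h' | h'
    · rw [h'] at h
      exact (Option.some.inj h) ▸ List.mem_cons_self
    · exact List.mem_cons_of_mem _ ((Option.some.inj h) ▸ h')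

theorem min2fold_aux (es : List (Int × Int)) (m : Int × Int)
    (h2 : ∀ e ∈ es, m.2 < e.2) (hp : es.Pairwise (fun a b => a.2 < b.2)) :
    es.foldl minStep (m.2, m.1) = ((es.foldl step2 m).2, (es.foldl step2 m).1) := by
  induction es generalizing m with
  | nil => rfl
  | cons e es ih =>
    simp only [List.foldl_cons]
    have hnot : ¬ (e.2 < m.2) := not_lt.mpr (le_of_lt (h2 e List.mem_cons_self))
    have hstep : step2 m e = if e.1 < m.1 then e else m := by
      unfold step2
      by_cases h3 : e.1 < m.1
      · simp [h3]
      · simp [h3, hnot]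
    have hmin : minStep (m.2, m.1) e = ((step2 m e).2, (step2 m e).1) := by
      rw [hstep]
      unfold minStep
      by_cases h3 : e.1 < m.1 <;> simp [h3]
    rw [hmin]
    apply ih
    · intro e' he'
      rw [hstep]
      by_cases h3 : e.1 < m.1
      · rw [if_pos h3]
        exact (List.pairwise_cons.mp hp).1 e' he'
      · rw [if_neg h3]
        exact h2 e' (List.mem_cons_of_mem _ he')
    · exact (List.pairwise_cons.mp hp).2

theorem minfold_min2 (es : List (Int × Int))
    (hb : ∀ e ∈ es, e.1 < 1000000000)
    (hp : es.Pairwise (fun a b => a.2 < b.2)) :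
    es.foldl minStep (-1, 1000000000) =
      match PySem.List.min2? es (fun p => p.1) (fun p => p.2) with
      | none => (-1, 1000000000)
      | some m => (m.2, m.1) := by
  cases es with
  | nil => rfl
  | cons e es =>
    rw [min2_eq]
    simp only [List.foldl_cons, min2b]
    rw [min2_some]
    have h1 : minStep (-1, 1000000000) e = (e.2, e.1) := by
      unfold minStep
      rw [if_pos (hb e List.mem_cons_self)]
    rw [h1]
    exact min2fold_aux es e (fun e' he' => (List.pairwise_cons.mp hp).1 e' he')
      (List.pairwise_cons.mp hp).2

theorem minfold_isMin (es : List (Int × Int)) (p : Int × Int) :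
    (es.foldl minStep p).2 ≤ p.2 ∧ ∀ e ∈ es, (es.foldl minStep p).2 ≤ e.1 := by
  induction es generalizing p with
  | nil => exact ⟨le_refl _, by simp⟩
  | cons e es ih =>
    simp only [List.foldl_cons]
    obtain ⟨ha, hb⟩ := ih (minStep p e)
    have hstep : (minStep p e).2 ≤ p.2 ∧ (minStep p e).2 ≤ e.1 := by
      unfold minStep
      split_ifs with h
      · exact ⟨le_of_lt h, le_refl _⟩
      · exact ⟨le_refl _, le_of_not_gt h⟩
    refine ⟨le_trans ha hstep.1, ?_⟩
    intro e' he'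
    rcases List.mem_cons.mp he' with rfl | he'
    · exact le_trans ha hstep.2
    · exact hb e' he'

theorem minfold_const (es : List (Int × Int)) (p : Int × Int)
    (h : ∀ e ∈ es, ¬ (e.1 < p.2)) : es.foldl minStep p = p := by
  induction es with
  | nil => rfl
  | cons e es ih =>
    simp only [List.foldl_cons]
    rw [show minStep p e = p from by unfold minStep; rw [if_neg (h e List.mem_cons_self)]]
    exact ih (fun e' he' => h e' (List.mem_cons_of_mem _ he'))

theorem minfold_unique (es : List (Int × Int)) (r j : Int) (p : Int × Int)
    (hmem : (r, j) ∈ es) (hlt : ∀ e ∈ es, e ≠ (r, j) → r < e.1) (hp : r < p.2) :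
    es.foldl minStep p = (j, r) := by
  induction es generalizing p with
  | nil => simp at hmem
  | cons e es ih =>
    simp only [List.foldl_cons]
    rcases eq_or_ne e (r, j) with rfl | hne
    · rw [show minStep p (r, j) = (j, r) from by unfold minStep; rw [if_pos hp]]
      apply minfold_const
      intro e' he'
      rcases eq_or_ne e' (r, j) with rfl | hne'
      · simp
      · exact not_lt.mpr (le_of_lt (hlt e' (List.mem_cons_of_mem _ he') hne'))
    · have hmem' : (r, j) ∈ es := by
        rcases List.mem_cons.mp hmem with h | h
        · exact absurd h.symm hne
        · exact h
      refine ih (minStep p e) hmem' (fun e' he' hne' => hlt e' (List.mem_cons_of_mem _ he') hne') ?_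
      unfold minStep
      split_ifs with h
      · exact hlt e List.mem_cons_self hne
      · exact hp

theorem mem_elig (arrival rem : List Int) (n time : Int) (e : Int × Int) :
    e ∈ sjfElig arrival rem n time ↔
      ∃ i : Int, 0 ≤ i ∧ i < n ∧ PySem.List.pyGetD arrival i 0 ≤ time ∧
        0 < PySem.List.pyGetD rem i 0 ∧ e = (PySem.List.pyGetD rem i 0, i) := by
  unfold sjfElig
  simp only [List.mem_map, List.mem_filter, PySem.List.mem_pyRange_one, Bool.and_eq_true,
    decide_eq_true_eq]
  constructor
  · rintro ⟨i, ⟨⟨h0, h1⟩, h2, h3⟩, rfl⟩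
    exact ⟨i, h0, h1, h2, h3, rfl⟩
  · rintro ⟨i, h0, h1, h2, h3, rfl⟩
    exact ⟨i, ⟨⟨h0, h1⟩, h2, h3⟩, rfl⟩

theorem mem_future (arrival rem : List Int) (n time : Int) (a : Int) :
    a ∈ sjfFuture arrival rem n time ↔
      ∃ i : Int, 0 ≤ i ∧ i < n ∧ time < PySem.List.pyGetD arrival i 0 ∧
        0 < PySem.List.pyGetD rem i 0 ∧ a = PySem.List.pyGetD arrival i 0 := by
  unfold sjfFuture
  simp only [List.mem_map, List.mem_filter, PySem.List.mem_pyRange_one, Bool.and_eq_true,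
    decide_eq_true_eq]
  constructor
  · rintro ⟨i, ⟨⟨h0, h1⟩, h2, h3⟩, rfl⟩
    exact ⟨i, h0, h1, h2, h3, rfl⟩
  · rintro ⟨i, h0, h1, h2, h3, rfl⟩
    exact ⟨i, ⟨⟨h0, h1⟩, h2, h3⟩, rfl⟩

theorem elig_pairwise (arrival rem : List Int) (n time : Int) :
    (sjfElig arrival rem n time).Pairwise (fun a b => a.2 < b.2) := by
  unfold sjfElig
  rw [List.pairwise_map]
  exact List.Pairwise.filter _ (PySem.List.pairwise_lt_pyRange_one 0 n)

-- ---- index helpers ----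
theorem pyGetD_idx (xs : List Int) (i : Int) (h0 : 0 ≤ i) (h1 : i < (xs.length : Int)) :
    PySem.List.pyGetD xs i 0 = xs[i.toNat]'(by omega) :=
  PySem.List.pyGetD_eq_getElem xs 0 h0 h1

theorem pyGetD_set_int (xs : List Int) (j v i : Int)
    (hj0 : 0 ≤ j) (hj1 : j < (xs.length : Int)) (hi0 : 0 ≤ i) (hi1 : i < (xs.length : Int)) :
    PySem.List.pyGetD (PySem.List.pySetD xs j v) i 0 = if i = j then v else PySem.List.pyGetD xs i 0 := by
  rw [PySem.List.pySetD_of_nonneg _ _ hj0]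
  rw [PySem.List.pyGetD_eq_getElem _ 0 hi0 (by simpa using hi1)]
  rw [List.getElem_set]
  by_cases h : i = j
  · rw [if_pos (by omega), if_pos h]
  · rw [if_neg (by omega), if_neg h, pyGetD_idx xs i hi0 hi1]

theorem drop_pySetD (xs : List Int) (j v : Int) (N : Nat) (hj0 : 0 ≤ j) (hj : j < (N : Int)) :
    (PySem.List.pySetD xs j v).drop N = xs.drop N := by
  rw [PySem.List.pySetD_of_nonneg _ _ hj0, List.drop_set, if_pos (by omega)]

theorem take_pySetD (xs : List Int) (j v : Int) (N : Nat) (hj0 : 0 ≤ j) :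
    (PySem.List.pySetD xs j v).take N = (xs.take N).set j.toNat v := by
  rw [PySem.List.pySetD_of_nonneg _ _ hj0, List.take_set]

theorem pyGetD_take (xs : List Int) (N : Nat) (i : Int)
    (h0 : 0 ≤ i) (h1 : i < (N : Int)) (h2 : N ≤ xs.length) :
    PySem.List.pyGetD (xs.take N) i 0 = PySem.List.pyGetD xs i 0 := by
  rw [pyGetD_idx _ i h0 (by simp [List.length_take]; omega),
      pyGetD_idx _ i h0 (by push_cast; omega)]
  exact List.getElem_take

theorem pyGetD_mem_of_range (xs : List Int) (i : Int) (h0 : 0 ≤ i) (h1 : i < (xs.length : Int)) :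
    PySem.List.pyGetD xs i 0 ∈ xs :=
  PySem.List.pyGetD_mem xs 0 ⟨by omega, h1⟩

theorem elig_take (arrival rem : List Int) (time : Int) (h : arrival.length ≤ rem.length) :
    sjfElig arrival (rem.take arrival.length) (arrival.length : Int) time
      = sjfElig arrival rem (arrival.length : Int) time := by
  unfold sjfElig
  rw [List.filter_congr (fun i hi => ?_)]
  · apply List.map_congr_left
    intro i hi
    have hm := List.mem_filter.mp hi
    have hr := PySem.List.mem_pyRange_one.mp hm.1
    rw [pyGetD_take rem arrival.length i hr.1 hr.2 h]
  · have hr := PySem.List.mem_pyRange_one.mp hi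
    rw [pyGetD_take rem arrival.length i hr.1 hr.2 h]

theorem future_take (arrival rem : List Int) (time : Int) (h : arrival.length ≤ rem.length) :
    sjfFuture arrival (rem.take arrival.length) (arrival.length : Int) time
      = sjfFuture arrival rem (arrival.length : Int) time := by
  unfold sjfFuture
  rw [List.filter_congr (fun i hi => ?_)]
  have hr := PySem.List.mem_pyRange_one.mp hi
  rw [pyGetD_take rem arrival.length i hr.1 hr.2 h]

-- ---- the A loop: waiting_time never affects the result ----
theorem wt_irrel (arrival burst : List Int) (total : Int) :
    ∀ (f : Nat) (rem pt wt wt' : List Int) (time curr : Int),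
      sjfLoop arrival burst total f rem pt wt time curr
        = sjfLoop arrival burst total f rem pt wt' time curr := by
  intro f
  induction f with
  | zero => intros; rfl
  | succ f ih =>
    intro rem pt wt wt' time curr
    simp only [sjfLoop]
    by_cases h1 : (sjfScan arrival rem total time).1 = -1
    · rw [if_pos h1, if_pos h1]
      by_cases h2 : PySem.List.max? rem (fun x => x) = some 0
      · rw [if_pos h2, if_pos h2]
      · rw [if_neg h2, if_neg h2]
        exact ih _ _ _ _ _ _
    · rw [if_neg h1, if_neg h1]
      exact ih _ _ _ _ _ _

-- ---- single ticks of the A loop ----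
theorem tick_run (arrival burst : List Int) (total : Int) (f : Nat)
    (rem pt wt : List Int) (time curr j : Int)
    (hj : 0 ≤ j) (hsel : selA arrival rem total time curr = j) :
    sjfLoop arrival burst total (f+1) rem pt wt time curr
      = sjfLoop arrival burst total f (PySem.List.pySetD rem j (PySem.List.pyGetD rem j 0 - 1))
          (pt ++ [j]) wt (time+1) j := by
  have hidx : ¬ ((sjfScan arrival rem total time).1 = -1) := by
    intro h
    unfold selA at hsel
    rw [if_pos h] at hsel
    omega
  unfold selA at hsel
  rw [if_neg hidx] at hsel
  simp only [sjfLoop]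
  rw [if_neg hidx, hsel]
  exact wt_irrel _ _ _ _ _ _ _ _ _ _

theorem tick_idle (arrival burst : List Int) (total : Int) (f : Nat)
    (rem pt wt : List Int) (time curr : Int)
    (hscan : (sjfScan arrival rem total time).1 = -1)
    (hmax : PySem.List.max? rem (fun x => x) ≠ some 0) :
    sjfLoop arrival burst total (f+1) rem pt wt time curr
      = sjfLoop arrival burst total f rem (pt ++ [-1]) wt (time+1) curr := by
  simp only [sjfLoop]
  rw [if_pos hscan, if_neg hmax]

theorem tick_break (arrival burst : List Int) (total : Int) (f : Nat)
    (rem pt wt : List Int) (time curr : Int)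
    (hscan : (sjfScan arrival rem total time).1 = -1)
    (hmax : PySem.List.max? rem (fun x => x) = some 0) :
    sjfLoop arrival burst total (f+1) rem pt wt time curr = pt := by
  simp only [sjfLoop]
  rw [if_pos hscan, if_pos hmax]

-- ---- scan wrappers ----
theorem scan_empty (arrival rem : List Int) (n time : Int)
    (h : sjfElig arrival rem n time = []) :
    sjfScan arrival rem n time = (-1, 1000000000) := by
  rw [scan_eq_fold, h]
  rfl

theorem scan_of_min2 (arrival rem : List Int) (n time : Int) (m : Int × Int)
    (hb : ∀ e ∈ sjfElig arrival rem n time, e.1 < 1000000000)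
    (hm : PySem.List.min2? (sjfElig arrival rem n time) (fun p => p.1) (fun p => p.2) = some m) :
    sjfScan arrival rem n time = (m.2, m.1) := by
  rw [scan_eq_fold, minfold_min2 _ hb (elig_pairwise arrival rem n time), hm]

theorem selA_unique (arrival rem : List Int) (n time curr j : Int)
    (hmem : (PySem.List.pyGetD rem j 0, j) ∈ sjfElig arrival rem n time)
    (huniq : ∀ e ∈ sjfElig arrival rem n time, e ≠ (PySem.List.pyGetD rem j 0, j) →
      PySem.List.pyGetD rem j 0 < e.1)
    (hb : PySem.List.pyGetD rem j 0 < 1000000000)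
    (hj0 : 0 ≤ j) (hcurr : curr = j) :
    selA arrival rem n time curr = j := by
  subst hcurr
  have hscan : sjfScan arrival rem n time = (curr, PySem.List.pyGetD rem curr 0) := by
    rw [scan_eq_fold]
    exact minfold_unique _ _ _ _ hmem huniq (by norm_num [hb])
  unfold selA
  rw [hscan]
  simp only
  rw [if_neg (by omega)]
  split_ifs <;> rfl

theorem pySetD_pySetD_same (xs : List Int) (j a b : Int) (hj : 0 ≤ j) :
    PySem.List.pySetD (PySem.List.pySetD xs j a) j b = PySem.List.pySetD xs j b := by
  rw [PySem.List.pySetD_of_nonneg _ _ hj, PySem.List.pySetD_of_nonneg _ _ hj,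
      PySem.List.pySetD_of_nonneg _ _ hj, List.set_set]

-- ---- chunks of consecutive identical ticks ----
theorem chunk_run (arrival burst : List Int) :
    ∀ (d : Nat) (f : Nat) (rem pt wt : List Int) (time curr j : Int),
    1 ≤ d →
    (∀ i : Int, 0 ≤ i → i < (arrival.length:Int) → PySem.List.pyGetD rem i 0 < 1000000000) →
    0 ≤ j → j < (arrival.length:Int) → arrival.length ≤ rem.length →
    PySem.List.pyGetD arrival j 0 ≤ time →
    (d:Int) ≤ PySem.List.pyGetD rem j 0 →
    (∀ i : Int, 0 ≤ i → i < (arrival.length:Int) → 0 < PySem.List.pyGetD rem i 0 →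
        time < PySem.List.pyGetD arrival i 0 → time + d ≤ PySem.List.pyGetD arrival i 0) →
    (∀ i : Int, 0 ≤ i → i < (arrival.length:Int) → i ≠ j →
        PySem.List.pyGetD arrival i 0 ≤ time → 0 < PySem.List.pyGetD rem i 0 →
        PySem.List.pyGetD rem j 0 ≤ PySem.List.pyGetD rem i 0) →
    selA arrival rem (arrival.length:Int) time curr = j →
    sjfLoop arrival burst (arrival.length:Int) (f + d) rem pt wt time curr
      = sjfLoop arrival burst (arrival.length:Int) f
          (PySem.List.pySetD rem j (PySem.List.pyGetD rem j 0 - d))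
          (pt ++ List.replicate d j) wt (time + d) j := by
  intro d
  induction d with
  | zero => intro f rem pt wt time curr j h1; omega
  | succ d ih =>
    intro f rem pt wt time curr j h1 hb hj0 hjn hlen harr hd hgap hmin hsel
    have hjr : j < (rem.length : Int) := by push_cast; omega
    have hstep := tick_run arrival burst (arrival.length:Int) (f + d) rem pt wt time curr j hj0 hsel
    rcases Nat.eq_zero_or_pos d with rfl | hdpos
    · rw [show f + 1 = f + 0 + 1 from by omega] at hstep
      rw [show f + 1 = f + 0 + 1 from by omega, hstep]
      norm_num
    · rw [show f + (d + 1) = (f + d) + 1 from by omega, hstep]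
      have hget1 : ∀ i : Int, 0 ≤ i → i < (arrival.length:Int) →
          PySem.List.pyGetD (PySem.List.pySetD rem j (PySem.List.pyGetD rem j 0 - 1)) i 0
            = if i = j then PySem.List.pyGetD rem j 0 - 1 else PySem.List.pyGetD rem i 0 := by
        intro i hi0 hi1
        exact pyGetD_set_int rem j _ i hj0 hjr hi0 (by push_cast; omega)
      have hget1j : PySem.List.pyGetD (PySem.List.pySetD rem j (PySem.List.pyGetD rem j 0 - 1)) j 0
          = PySem.List.pyGetD rem j 0 - 1 := by rw [hget1 j hj0 hjn, if_pos rfl]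
      have happ := ih f (PySem.List.pySetD rem j (PySem.List.pyGetD rem j 0 - 1)) (pt ++ [j]) wt
        (time + 1) j j hdpos
        (by
          intro i hi0 hi1
          rw [hget1 i hi0 hi1]
          split_ifs
          · have := hb j hj0 hjn; omega
          · exact hb i hi0 hi1)
        hj0 hjn (by rw [PySem.List.length_pySetD]; exact hlen)
        (by omega)
        (by rw [hget1j]; push_cast at hd ⊢; omega)
        (by
          intro i hi0 hi1 hpos hfut
          rw [hget1 i hi0 hi1] at hpos
          by_cases hij : i = j
          · rw [hij] at hfut; omega
          · rw [if_neg hij] at hpos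
            have := hgap i hi0 hi1 hpos (by omega)
            push_cast at this ⊢
            omega)
        (by
          intro i hi0 hi1 hij hiarr hpos
          rw [hget1 i hi0 hi1, if_neg hij] at hpos
          rw [hget1 i hi0 hi1, if_neg hij, hget1j]
          by_cases hiarr' : PySem.List.pyGetD arrival i 0 ≤ time
          · have := hmin i hi0 hi1 hij hiarr' hpos; omega
          · have := hgap i hi0 hi1 hpos (by omega)
            push_cast at this
            omega)
        (by
          apply selA_unique
          · rw [mem_elig]
            refine ⟨j, hj0, hjn, by omega, ?_, rfl⟩
            rw [hget1j]
            push_cast at hd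
            omega
          · intro e he hne
            obtain ⟨i, hi0, hi1, hiarr, hipos, rfl⟩ := (mem_elig _ _ _ _ _).mp he
            by_cases hij : i = j
            · exfalso
              apply hne
              rw [hij, hget1j]
            · rw [hget1 i hi0 hi1, if_neg hij] at hipos ⊢
              rw [hget1j]
              by_cases hiarr' : PySem.List.pyGetD arrival i 0 ≤ time
              · have := hmin i hi0 hi1 hij hiarr' hipos; omega
              · have := hgap i hi0 hi1 hipos (by omega)
                push_cast at this
                omega
          · rw [hget1j]
            have := hb j hj0 hjn
            omega
          · exact hj0
          · rfl)
      rw [happ, pySetD_pySetD_same _ _ _ _ hj0, hget1j]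
      rw [show PySem.List.pyGetD rem j 0 - 1 - (d:Int) = PySem.List.pyGetD rem j 0 - ((d:Nat)+1:Int) from by push_cast; ring]
      rw [List.append_assoc]
      rw [show ([j] : List Int) ++ List.replicate d j = List.replicate (d+1) j from by
        rw [List.replicate_succ]; rfl]
      rw [show time + 1 + (d:Int) = time + ((d:Nat)+1:Int) from by push_cast; ring]
      rfl

theorem chunk_idle (arrival burst : List Int) :
    ∀ (d : Nat) (f : Nat) (rem pt wt : List Int) (time curr : Int),
    1 ≤ d →
    arrival.length ≤ rem.length →
    (∀ i : Int, 0 ≤ i → i < (arrival.length:Int) → 0 < PySem.List.pyGetD rem i 0 →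
        time + d ≤ PySem.List.pyGetD arrival i 0) →
    (∃ i : Int, 0 ≤ i ∧ i < (arrival.length:Int) ∧ 0 < PySem.List.pyGetD rem i 0) →
    sjfLoop arrival burst (arrival.length:Int) (f + d) rem pt wt time curr
      = sjfLoop arrival burst (arrival.length:Int) f rem (pt ++ List.replicate d (-1)) wt (time + d) curr := by
  intro d
  induction d with
  | zero => intro f rem pt wt time curr h1; omega
  | succ d ih =>
    intro f rem pt wt time curr h1 hlen hidle hpos
    have hE : sjfElig arrival rem (arrival.length:Int) time = [] := by
      rcases hE' : sjfElig arrival rem (arrival.length:Int) time with _ | ⟨e, es⟩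
      · rfl
      · exfalso
        have he : e ∈ sjfElig arrival rem (arrival.length:Int) time := by
          rw [hE']; exact List.mem_cons_self
        obtain ⟨i, hi0, hi1, hiarr, hipos, rfl⟩ := (mem_elig _ _ _ _ _).mp he
        have := hidle i hi0 hi1 hipos
        push_cast at this
        omega
    have hscan : (sjfScan arrival rem (arrival.length:Int) time).1 = -1 := by
      rw [scan_empty _ _ _ _ hE]
    have hmax : PySem.List.max? rem (fun x => x) ≠ some 0 := by
      intro hmax
      obtain ⟨i0, hi00, hi01, hi0pos⟩ := hpos
      have hmem := pyGetD_mem_of_range rem i0 hi00 (by push_cast; omega)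
      have := PySem.List.max?_isMax hmax _ hmem
      simp only at this
      omega
    have hstep := tick_idle arrival burst (arrival.length:Int) (f + d) rem pt wt time curr hscan hmax
    rcases Nat.eq_zero_or_pos d with rfl | hdpos
    · rw [show f + 1 = f + 0 + 1 from by omega] at hstep
      rw [show f + 1 = f + 0 + 1 from by omega, hstep]
      norm_num
    · rw [show f + (d + 1) = (f + d) + 1 from by omega, hstep]
      have happ := ih f rem (pt ++ [-1]) wt (time + 1) curr hdpos hlen
        (by
          intro i hi0 hi1 hipos
          have := hidle i hi0 hi1 hipos
          push_cast at this ⊢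
          omega)
        hpos
      rw [happ, List.append_assoc]
      rw [show ([(-1:Int)]) ++ List.replicate d (-1) = List.replicate (d+1) (-1) from by
        rw [List.replicate_succ]; rfl]
      rw [show time + 1 + (d:Int) = time + ((d:Nat)+1:Int) from by push_cast; ring]
      rfl

theorem loop_break (arrival burst : List Int) (f : Nat) (rem pt wt : List Int) (time curr : Int)
    (hE : sjfElig arrival rem (arrival.length:Int) time = [])
    (hall : ∀ x ∈ rem, x ≤ 0) (hzero : (0:Int) ∈ rem) :
    sjfLoop arrival burst (arrival.length:Int) (f+1) rem pt wt time curr = pt := by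
  apply tick_break
  · rw [scan_empty _ _ _ _ hE]
  · rcases hm : PySem.List.max? rem (fun x => x) with _ | m
    · rw [PySem.List.max?_eq_none_iff] at hm
      rw [hm] at hzero
      simp at hzero
    · have h1 := PySem.List.max?_isMax hm 0 hzero
      have h2 := hall m (PySem.List.max?_mem hm)
      simp only at h1
      rw [show m = 0 from le_antisymm h2 h1]

-- ---- termination potential ----
def sumPos (xs : List Int) : Int := (xs.map (fun b => max b 0)).sum

def amax (xs : List Int) : Int := xs.foldl (fun m a => max m a) 0

def phi (arrival rem : List Int) (time : Int) : Int :=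
  sumPos (rem.take arrival.length) + max (amax arrival - time) 0

theorem sumPos_nonneg (xs : List Int) : 0 ≤ sumPos xs := by
  apply List.sum_nonneg
  intro x hx
  obtain ⟨b, _, rfl⟩ := List.mem_map.mp hx
  exact le_max_right _ _

theorem sumPos_cons (x : Int) (xs : List Int) : sumPos (x :: xs) = max x 0 + sumPos xs := by
  simp [sumPos]

theorem sumPos_append (xs ys : List Int) : sumPos (xs ++ ys) = sumPos xs + sumPos ys := by
  simp [sumPos]

theorem foldl_max_facts (xs : List Int) : ∀ (init : Int),
    init ≤ xs.foldl (fun m a => max m a) init ∧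
    ∀ a ∈ xs, a ≤ xs.foldl (fun m a => max m a) init := by
  induction xs with
  | nil => intro init; exact ⟨le_refl _, by simp⟩
  | cons x xs ih =>
    intro init
    obtain ⟨h1, h2⟩ := ih (max init x)
    refine ⟨le_trans (le_max_left _ _) h1, ?_⟩
    intro a ha
    rcases List.mem_cons.mp ha with rfl | ha
    · exact le_trans (le_max_right _ _) h1
    · exact h2 a ha

theorem amax_nonneg (xs : List Int) : 0 ≤ amax xs := (foldl_max_facts xs 0).1

theorem le_amax (xs : List Int) (a : Int) (h : a ∈ xs) : a ≤ amax xs := (foldl_max_facts xs 0).2 a h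

theorem phi_nonneg (arrival rem : List Int) (time : Int) : 0 ≤ phi arrival rem time := by
  have h1 := sumPos_nonneg (rem.take arrival.length)
  have h2 : (0:Int) ≤ max (amax arrival - time) 0 := le_max_right _ _
  unfold phi
  omega

theorem sumPos_set (xs : List Int) : ∀ (k : Nat) (v : Int) (h : k < xs.length),
    sumPos (xs.set k v) = sumPos xs - max (xs[k]'h) 0 + max v 0 := by
  induction xs with
  | nil => intro k v h; simp at h
  | cons x xs ih =>
    intro k v h
    cases k with
    | zero => simp [sumPos_cons]; ring
    | succ k =>
      simp only [List.set_cons_succ, sumPos_cons, List.getElem_cons_succ]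
      rw [ih k v (by simpa using h)]
      ring

theorem sumPos_take_set (rem : List Int) (N : Nat) (j d : Int)
    (hj0 : 0 ≤ j) (hjn : j < (N:Int)) (hlen : N ≤ rem.length)
    (hd0 : 0 ≤ d) (hd : d ≤ PySem.List.pyGetD rem j 0) :
    sumPos ((PySem.List.pySetD rem j (PySem.List.pyGetD rem j 0 - d)).take N)
      = sumPos (rem.take N) - d := by
  rw [take_pySetD _ _ _ _ hj0]
  have hjl : j.toNat < (rem.take N).length := by simp [List.length_take]; omega
  rw [sumPos_set _ j.toNat _ hjl]
  have hget : (rem.take N)[j.toNat]'hjl = PySem.List.pyGetD rem j 0 := by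
    rw [List.getElem_take, ← pyGetD_idx rem j hj0 (by push_cast; omega)]
  rw [hget]
  have hr : 0 < PySem.List.pyGetD rem j 0 ∨ 0 ≤ PySem.List.pyGetD rem j 0 := Or.inr (by omega)
  rw [show max (PySem.List.pyGetD rem j 0) 0 = PySem.List.pyGetD rem j 0 from by omega,
      show max (PySem.List.pyGetD rem j 0 - d) 0 = PySem.List.pyGetD rem j 0 - d from by omega]
  ring

theorem le_sumPos (xs : List Int) : ∀ (k : Nat) (h : k < xs.length), max (xs[k]'h) 0 ≤ sumPos xs := by
  induction xs with
  | nil => intro k h; simp at h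
  | cons x xs ih =>
    intro k h
    cases k with
    | zero =>
      rw [sumPos_cons]
      have := sumPos_nonneg xs
      simp only [List.getElem_cons_zero]
      omega
    | succ k =>
      rw [sumPos_cons]
      have h1 := ih k (by simpa using h)
      simp only [List.getElem_cons_succ]
      have h2 : (0:Int) ≤ max x 0 := le_max_right _ _
      omega

-- ---- the simulation: one B step corresponds to a chunk of A ticks ----
theorem sim (arrival burst : List Int)
    (hlen : arrival.length ≤ burst.length)
    (hwit : ∃ w : Int, 0 ≤ w ∧ w < (arrival.length:Int) ∧ 0 < PySem.List.pyGetD burst w 0)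
    (hbb : ∀ i : Int, 0 ≤ i → i < (arrival.length:Int) → PySem.List.pyGetD burst i 0 < 1000000000)
    (hextra : ∀ b ∈ burst.drop arrival.length, b ≤ 0) :
    ∀ (fB fA : Nat) (rem pt wt : List Int) (time curr : Int),
    rem.length = burst.length →
    rem.drop arrival.length = burst.drop arrival.length →
    (∀ i : Int, 0 ≤ i → i < (arrival.length:Int) →
      PySem.List.pyGetD rem i 0 ≤ PySem.List.pyGetD burst i 0) →
    (∀ i : Int, 0 ≤ i → i < (arrival.length:Int) → 0 ≤ PySem.List.pyGetD burst i 0 →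
      0 ≤ PySem.List.pyGetD rem i 0) →
    time = (pt.length : Int) →
    (curr = -1 ∨ (0 ≤ curr ∧ curr < (arrival.length:Int) ∧ PySem.List.pyGetD arrival curr 0 ≤ time)) →
    (rem = burst ∨ pt ≠ []) →
    phi arrival rem time < (fA:Int) →
    phi arrival rem time < (fB:Int) →
    change_time_to_process (sjfLoop arrival burst (arrival.length:Int) fA rem pt wt time curr)
      = sjfAltLoop arrival (arrival.length:Int) fB (rem.take arrival.length) (rep pt) time curr := by
  intro fB
  induction fB with
  | zero =>
    intro fA rem pt wt time curr _ _ _ _ _ _ _ _ hfB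
    have := phi_nonneg arrival rem time
    omega
  | succ fB ih =>
    intro fA rem pt wt time curr hlenR hdropR hle hnn htime hcurr hinit hfA hfB
    have hNlen : arrival.length ≤ rem.length := by omega
    have hphi0 := phi_nonneg arrival rem time
    simp only [sjfAltLoop]
    rw [elig_take arrival rem time hNlen, future_take arrival rem time hNlen]
    by_cases hE : sjfElig arrival rem (arrival.length:Int) time = []
    · rw [hE]
      simp only [List.isEmpty_nil, if_true]
      rcases hF : PySem.List.min? (sjfFuture arrival rem (arrival.length:Int) time) (fun x => x)
        with _ | nxt
      · -- A breaks, B returns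
        have hFe : sjfFuture arrival rem (arrival.length:Int) time = [] :=
          (PySem.List.min?_eq_none_iff _ _).mp hF
        have hnone : ∀ i : Int, 0 ≤ i → i < (arrival.length:Int) →
            PySem.List.pyGetD rem i 0 ≤ 0 := by
          intro i hi0 hi1
          by_contra hpos
          push_neg at hpos
          by_cases hiarr : PySem.List.pyGetD arrival i 0 ≤ time
          · have hmem : (PySem.List.pyGetD rem i 0, i) ∈ sjfElig arrival rem (arrival.length:Int) time :=
              (mem_elig _ _ _ _ _).mpr ⟨i, hi0, hi1, hiarr, hpos, rfl⟩
            rw [hE] at hmem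
            simp at hmem
          · have hmem : PySem.List.pyGetD arrival i 0 ∈ sjfFuture arrival rem (arrival.length:Int) time :=
              (mem_future _ _ _ _ _).mpr ⟨i, hi0, hi1, by omega, hpos, rfl⟩
            rw [hFe] at hmem
            simp at hmem
        have hall : ∀ x ∈ rem, x ≤ 0 := by
          intro x hx
          obtain ⟨k, hk, rfl⟩ := List.mem_iff_getElem.mp hx
          by_cases hkN : k < arrival.length
          · have h := hnone (k:Int) (by positivity) (by push_cast; omega)
            rw [pyGetD_idx rem (k:Int) (by positivity) (by push_cast; omega)] at h
            simpa using h
          · have hmem : rem[k] ∈ rem.drop arrival.length := by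
              rw [List.mem_iff_getElem]
              refine ⟨k - arrival.length, by simp [List.length_drop]; omega, ?_⟩
              rw [List.getElem_drop]
              congr 1
              omega
            rw [hdropR] at hmem
            exact hextra _ hmem
        have hzero : (0:Int) ∈ rem := by
          obtain ⟨w, hw0, hw1, hwpos⟩ := hwit
          have h1 : PySem.List.pyGetD rem w 0 ≤ 0 := hnone w hw0 hw1
          have h2 : 0 ≤ PySem.List.pyGetD rem w 0 := hnn w hw0 hw1 (by omega)
          rw [show (0:Int) = PySem.List.pyGetD rem w 0 from by omega]
          exact pyGetD_mem_of_range rem w hw0 (by push_cast; omega)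
        have hpt : pt ≠ [] := by
          rcases hinit with rfl | h
          · exfalso
            obtain ⟨w, hw0, hw1, hwpos⟩ := hwit
            have := hnone w hw0 hw1
            omega
          · exact h
        cases fA with
        | zero => exfalso; omega
        | succ fA' =>
          rw [loop_break arrival burst fA' rem pt wt time curr hE hall hzero]
          exact ctp_rep pt hpt
      · -- idle chunk
        have hnxtmem := PySem.List.min?_mem hF
        obtain ⟨i0, hi00, hi01, hi0fut, hi0pos, hnxt⟩ := (mem_future _ _ _ _ _).mp hnxtmem
        have htlt : time < nxt := by rw [hnxt]; exact hi0fut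
        set d : Nat := (nxt - time).toNat with hdd
        have hdint : (d:Int) = nxt - time := by omega
        have hd1 : 1 ≤ d := by omega
        have hidle : ∀ i : Int, 0 ≤ i → i < (arrival.length:Int) →
            0 < PySem.List.pyGetD rem i 0 → time + d ≤ PySem.List.pyGetD arrival i 0 := by
          intro i hi0 hi1 hipos
          have hiarr : ¬ (PySem.List.pyGetD arrival i 0 ≤ time) := by
            intro hiarr
            have hmem : (PySem.List.pyGetD rem i 0, i) ∈ sjfElig arrival rem (arrival.length:Int) time :=
              (mem_elig _ _ _ _ _).mpr ⟨i, hi0, hi1, hiarr, hipos, rfl⟩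
            rw [hE] at hmem
            simp at hmem
          have hmem : PySem.List.pyGetD arrival i 0 ∈ sjfFuture arrival rem (arrival.length:Int) time :=
            (mem_future _ _ _ _ _).mpr ⟨i, hi0, hi1, by omega, hipos, rfl⟩
          have := PySem.List.min?_isMin hF _ hmem
          simp only at this
          omega
        have hpos : ∃ i : Int, 0 ≤ i ∧ i < (arrival.length:Int) ∧ 0 < PySem.List.pyGetD rem i 0 :=
          ⟨i0, hi00, hi01, hi0pos⟩
        have hnxtmax : nxt ≤ amax arrival := by
          rw [hnxt]
          exact le_amax _ _ (pyGetD_mem_of_range arrival i0 hi00 (by push_cast; omega))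
        have hsum0 := sumPos_nonneg (rem.take arrival.length)
        have hphi' : phi arrival rem (time + d) = phi arrival rem time - d := by
          unfold phi
          rw [show max (amax arrival - time) 0 = amax arrival - time from by omega,
              show max (amax arrival - (time + (d:Int))) 0 = amax arrival - (time + d) from by omega]
          ring
        have hphid : (d:Int) ≤ phi arrival rem time := by
          unfold phi
          have : (d:Int) ≤ max (amax arrival - time) 0 := by omega
          omega
        rw [show fA = (fA - d) + d from by omega,
            chunk_idle arrival burst d (fA - d) rem pt wt time curr hd1 hNlen hidle hpos]
        have hrec := ih (fA - d) rem (pt ++ List.replicate d (-1)) wt (time + d) curr hlenR hdropR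
          hle hnn
          (by rw [List.length_append, List.length_replicate]; push_cast; omega)
          (by
            rcases hcurr with rfl | ⟨h1, h2, h3⟩
            · exact Or.inl rfl
            · exact Or.inr ⟨h1, h2, by omega⟩)
          (Or.inr (by
            intro hcontra
            have := congrArg List.length hcontra
            simp [List.length_replicate] at this
            omega))
          (by rw [hphi']; push_cast; omega)
          (by rw [hphi']; push_cast; omega)
        rw [hrec, rep_chunk pt (-1) d hd1]
        rw [show nxt = time + (d:Int) from by omega, htime]
    · -- run chunk
      rw [if_neg (by simpa [List.isEmpty_iff] using hE)]
      split
      next hm =>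
        obtain ⟨m', hm'⟩ := min2_ne_nil _ hE
        simp [hm'] at hm
      next m hm =>
      obtain ⟨i1, hi10, hi11, hi1arr, hi1pos, hmeq⟩ := (mem_elig _ _ _ _ _).mp (min2_mem _ _ hm)
      have hm1 : m.1 = PySem.List.pyGetD rem i1 0 := by rw [hmeq]
      have hm2 : m.2 = i1 := by rw [hmeq]
      have hbE : ∀ e ∈ sjfElig arrival rem (arrival.length:Int) time, e.1 < 1000000000 := by
        intro e he
        obtain ⟨i, hi0, hi1, _, _, rfl⟩ := (mem_elig _ _ _ _ _).mp he
        have h1 := hle i hi0 hi1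
        have h2 := hbb i hi0 hi1
        simp only
        omega
      have hcondeq : (curr ≠ -1 ∧ PySem.List.pyGetD (rem.take arrival.length) curr 0 = m.1)
          = (curr ≠ -1 ∧ PySem.List.pyGetD rem curr 0 = m.1) := by
        apply propext
        constructor
        · rintro ⟨h1, h2⟩
          rcases hcurr with rfl | ⟨hc1, hc2, _⟩
          · exact absurd rfl h1
          · exact ⟨h1, by rw [← pyGetD_take rem arrival.length curr hc1 hc2 hNlen]; exact h2⟩
        · rintro ⟨h1, h2⟩
          rcases hcurr with rfl | ⟨hc1, hc2, _⟩
          · exact absurd rfl h1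
          · exact ⟨h1, by rw [pyGetD_take rem arrival.length curr hc1 hc2 hNlen]; exact h2⟩
      simp only [hcondeq]
      set j := if curr ≠ -1 ∧ PySem.List.pyGetD rem curr 0 = m.1 then curr else m.2 with hjdef
      have hjfacts : 0 ≤ j ∧ j < (arrival.length:Int) ∧ PySem.List.pyGetD arrival j 0 ≤ time ∧
          PySem.List.pyGetD rem j 0 = m.1 := by
        rw [hjdef]
        split_ifs with hc
        · rcases hcurr with rfl | ⟨h1, h2, h3⟩
          · exact absurd rfl hc.1
          · exact ⟨h1, h2, h3, hc.2⟩
        · rw [hm2]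
          exact ⟨hi10, hi11, hi1arr, by rw [hm1]⟩
      obtain ⟨hj0, hjN, hjarr, hjr⟩ := hjfacts
      have hminE : ∀ e ∈ sjfElig arrival rem (arrival.length:Int) time, m.1 ≤ e.1 := by
        have hscan := scan_of_min2 arrival rem (arrival.length:Int) time m hbE hm
        have hmf := minfold_isMin (sjfElig arrival rem (arrival.length:Int) time) (-1, 1000000000)
        rw [← scan_eq_fold, hscan] at hmf
        exact hmf.2
      have hsel : selA arrival rem (arrival.length:Int) time curr = j := by
        unfold selA
        rw [scan_of_min2 arrival rem (arrival.length:Int) time m hbE hm]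
        simp only
        rw [if_neg (by rw [hm2]; omega)]
        have hrm2 : PySem.List.pyGetD rem m.2 0 = m.1 := by rw [hm2, hm1]
        rw [hjdef]
        apply if_congr ?_ rfl rfl
        rw [hrm2]
        exact ⟨fun ⟨a, b⟩ => ⟨a, b.symm⟩, fun ⟨a, b⟩ => ⟨a, b.symm⟩⟩
      have hjget : PySem.List.pyGetD (rem.take arrival.length) j 0 = PySem.List.pyGetD rem j 0 :=
        pyGetD_take rem arrival.length j hj0 hjN hNlen
      rw [hjget]
      obtain ⟨stop, hstopdef, hstop1, hstop2, hstop3⟩ :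
          ∃ stop : Int,
            (match PySem.List.min? (sjfFuture arrival rem (arrival.length:Int) time) (fun x => x) with
              | none => time + PySem.List.pyGetD rem j 0
              | some mf => min (time + PySem.List.pyGetD rem j 0) mf) = stop ∧
            1 ≤ stop - time ∧ stop - time ≤ PySem.List.pyGetD rem j 0 ∧
            (∀ i : Int, 0 ≤ i → i < (arrival.length:Int) → 0 < PySem.List.pyGetD rem i 0 →
              time < PySem.List.pyGetD arrival i 0 → stop ≤ PySem.List.pyGetD arrival i 0) := by
        rcases hFm : PySem.List.min? (sjfFuture arrival rem (arrival.length:Int) time) (fun x => x)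
          with _ | mf
        · refine ⟨time + PySem.List.pyGetD rem j 0, rfl, by rw [hjr, hm1]; omega, by omega, ?_⟩
          intro i hi0 hi1 hipos hifut
          exfalso
          have hmem : PySem.List.pyGetD arrival i 0 ∈ sjfFuture arrival rem (arrival.length:Int) time :=
            (mem_future _ _ _ _ _).mpr ⟨i, hi0, hi1, hifut, hipos, rfl⟩
          rw [(PySem.List.min?_eq_none_iff _ _).mp hFm] at hmem
          simp at hmem
        · have hmfmem := PySem.List.min?_mem hFm
          obtain ⟨i2, hi20, hi21, hi2fut, hi2pos, hmf2⟩ := (mem_future _ _ _ _ _).mp hmfmem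
          refine ⟨min (time + PySem.List.pyGetD rem j 0) mf, rfl, ?_, by omega, ?_⟩
          · have h1 : time < mf := by rw [hmf2]; exact hi2fut
            have h2 : 0 < PySem.List.pyGetD rem j 0 := by rw [hjr, hm1]; exact hi1pos
            omega
          · intro i hi0 hi1 hipos hifut
            have hmem : PySem.List.pyGetD arrival i 0 ∈ sjfFuture arrival rem (arrival.length:Int) time :=
              (mem_future _ _ _ _ _).mpr ⟨i, hi0, hi1, hifut, hipos, rfl⟩
            have := PySem.List.min?_isMin hFm _ hmem
            simp only at this
            omega
      rw [hstopdef]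
      set d : Nat := (stop - time).toNat with hdd
      have hdint : (d:Int) = stop - time := by omega
      have hd1 : 1 ≤ d := by omega
      have hchunk := chunk_run arrival burst d (fA - d) rem pt wt time curr j hd1
        (by
          intro i hi0 hi1
          have h1 := hle i hi0 hi1
          have h2 := hbb i hi0 hi1
          omega)
        hj0 hjN hNlen hjarr (by omega)
        (by
          intro i hi0 hi1 hipos hifut
          have := hstop3 i hi0 hi1 hipos hifut
          omega)
        (by
          intro i hi0 hi1 hij hiarr hipos
          have hmem : (PySem.List.pyGetD rem i 0, i) ∈ sjfElig arrival rem (arrival.length:Int) time :=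
            (mem_elig _ _ _ _ _).mpr ⟨i, hi0, hi1, hiarr, hipos, rfl⟩
          have := hminE _ hmem
          simp only at this
          omega)
        hsel
      have hjrem : j < (rem.length : Int) := by push_cast; omega
      have hsumset := sumPos_take_set rem arrival.length j (stop - time) hj0 hjN hNlen
        (by omega) (by omega)
      have hsum0 := sumPos_nonneg (rem.take arrival.length)
      have hjpos : 0 < PySem.List.pyGetD rem j 0 := by rw [hjr, hm1]; exact hi1pos
      have hjtake : max (PySem.List.pyGetD rem j 0) 0 ≤ sumPos (rem.take arrival.length) := by
        have hjl : j.toNat < (rem.take arrival.length).length := by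
          simp [List.length_take]
          omega
        have := le_sumPos (rem.take arrival.length) j.toNat hjl
        have hgete : (rem.take arrival.length)[j.toNat]'hjl = PySem.List.pyGetD rem j 0 := by
          rw [List.getElem_take, ← pyGetD_idx rem j hj0 (by push_cast; omega)]
        rw [hgete] at this
        exact this
      have hphid : (d:Int) ≤ phi arrival rem time := by
        unfold phi
        have h2 : (0:Int) ≤ max (amax arrival - time) 0 := le_max_right _ _
        omega
      rw [show fA = (fA - d) + d from by omega, hchunk]
      have hmax2 : max (amax arrival - (time + (d:Int))) 0 ≤ max (amax arrival - time) 0 := by omega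
      have hphi' : phi arrival (PySem.List.pySetD rem j (PySem.List.pyGetD rem j 0 - d))
          (time + d) ≤ phi arrival rem time - d := by
        unfold phi
        rw [show (PySem.List.pyGetD rem j 0 - (d:Int)) = PySem.List.pyGetD rem j 0 - (stop - time) from by omega]
        rw [hsumset]
        omega
      have hrec := ih (fA - d) (PySem.List.pySetD rem j (PySem.List.pyGetD rem j 0 - d))
        (pt ++ List.replicate d j) wt (time + d) j
        (by rw [PySem.List.length_pySetD]; exact hlenR)
        (by rw [drop_pySetD rem j _ arrival.length hj0 hjN]; exact hdropR)
        (by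
          intro i hi0 hi1
          rw [pyGetD_set_int rem j _ i hj0 hjrem hi0 (by push_cast; omega)]
          split_ifs with hij
          · rw [hij]
            have := hle j hj0 hjN
            omega
          · exact hle i hi0 hi1)
        (by
          intro i hi0 hi1 hbpos
          rw [pyGetD_set_int rem j _ i hj0 hjrem hi0 (by push_cast; omega)]
          split_ifs with hij
          · omega
          · exact hnn i hi0 hi1 hbpos)
        (by rw [List.length_append, List.length_replicate]; push_cast; omega)
        (Or.inr ⟨hj0, hjN, by omega⟩)
        (Or.inr (by
          intro hcontra
          have := congrArg List.length hcontra
          simp [List.length_replicate] at this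
          omega))
        (by push_cast; omega)
        (by push_cast; omega)
      rw [hrec, rep_chunk pt j d hd1]
      rw [show stop = time + (d:Int) from by omega, htime]
      rw [show ((pt.length:Int) + d - pt.length) = (d:Int) from by ring,
          take_pySetD rem j _ arrival.length hj0,
          PySem.List.pySetD_of_nonneg _ _ hj0]

theorem sumPos_foldl (xs : List Int) : ∀ a : Int,
    xs.foldl (fun s b => s + max b 0) a = a + sumPos xs := by
  induction xs with
  | nil => intro a; simp [sumPos]
  | cons x xs ih =>
    intro a
    rw [List.foldl_cons, ih, sumPos_cons]
    ring

-- ===== VERDICT (by name: the statement is the Claim_ definition above) =====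
theorem shortest_job_first_spec : Claim_equal_shortest_job_first := by
  intro arrival burst hdom hpre
  obtain ⟨hl, hex, hb9, hdropPre⟩ := hpre
  unfold Spec_shortest_job_first shortest_job_first shortest_job_first_alt
  rw [PySem.List.slice_to_natCast]
  have hwit : ∃ w : Int, 0 ≤ w ∧ w < (arrival.length:Int) ∧ 0 < PySem.List.pyGetD burst w 0 := by
    obtain ⟨i, hi, hpos⟩ := hex
    refine ⟨(i:Int), by positivity, by push_cast; omega, ?_⟩
    rw [PySem.List.pyGetD_natCast]
    exact hpos
  have hbb : ∀ i : Int, 0 ≤ i → i < (arrival.length:Int) →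
      PySem.List.pyGetD burst i 0 < 1000000000 := by
    intro i h0 h1
    have h := hb9 i.toNat (by omega)
    rw [show i = ((i.toNat : Nat) : Int) from by omega, PySem.List.pyGetD_natCast]
    exact h
  have hS : burst.foldl (fun s b => s + max b 0) 0 = sumPos burst := by
    rw [sumPos_foldl]
    ring
  have hsplit : sumPos burst = sumPos (burst.take arrival.length) + sumPos (burst.drop arrival.length) := by
    rw [← sumPos_append, List.take_append_drop]
  have hd0 := sumPos_nonneg (burst.drop arrival.length)
  have ha0 := amax_nonneg arrival
  have hfuel : phi arrival burst 0 < ((sjfFuel arrival burst : Nat) : Int) := by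
    unfold phi sjfFuel
    simp only [sub_zero]
    rw [max_eq_left ha0]
    show sumPos (burst.take arrival.length) + amax arrival <
      (((amax arrival + burst.foldl (fun s b => s + max b 0) 0).toNat + 2 : Nat) : Int)
    rw [hS]
    omega
  have h := sim arrival burst hl hwit hbb hdropPre (sjfFuel arrival burst) (sjfFuel arrival burst)
    burst [] (List.replicate arrival.length 0) 0 (-1) rfl rfl
    (fun i _ _ => le_refl _) (fun i _ _ hh => hh) (by simp) (Or.inl rfl) (Or.inl rfl)
    hfuel hfuel
  simpa [rep] using h
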